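-- pv_equiv track=rewrite | github.com/mauramalinka/python_bootcamp | funkcje/zad3.py | policz_znaki
-- ===== SOURCE A (Python) =====
-- def policz_znaki(napis, start="<", end=">"):
--     ile_znakow = 0
--     poziom = 0
--     for znak in napis:
--         if znak == start:
--             poziom += 1
--         elif znak == end:
--             poziom -= 1
--         else:
--             ile_znakow += poziom
--     return ile_znakow
-- ===== SOURCE B (Python) =====
-- def policz_znaki(napis, start="<", end=">"):
--     deltas = [1 if z == start else (-1 if z == end else 0) for z in napis]
--     levels = []
--     acc = 0
--     for d in deltas:
--         levels.append(acc)
--         acc += d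
--     return sum(lvl for z, lvl in zip(napis, levels) if z != start and z != end)
-- ===== Notes on version B (the rewrite author's own statement) =====
-- stated objective: alternative
-- what changed: Replaces A's single loop with a dual inline accumulator by a three-stage pipeline: map characters to bracket deltas, build the exclusive prefix-level sequence, then sum levels over non-bracket characters via zip+filter.
import Mathlib
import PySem

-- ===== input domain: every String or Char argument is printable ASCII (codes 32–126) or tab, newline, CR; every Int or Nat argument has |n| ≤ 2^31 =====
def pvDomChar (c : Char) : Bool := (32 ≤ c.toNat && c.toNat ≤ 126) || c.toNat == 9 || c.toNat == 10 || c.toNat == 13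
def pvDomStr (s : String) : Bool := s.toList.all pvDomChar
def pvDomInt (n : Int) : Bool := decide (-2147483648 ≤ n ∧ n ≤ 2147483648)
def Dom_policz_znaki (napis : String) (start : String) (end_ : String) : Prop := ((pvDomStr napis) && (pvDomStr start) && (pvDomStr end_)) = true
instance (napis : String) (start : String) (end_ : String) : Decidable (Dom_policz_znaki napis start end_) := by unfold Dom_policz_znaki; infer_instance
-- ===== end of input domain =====

-- B splits A's single dual-accumulator loop into a delta map, an exclusive prefix-level
-- scan, and a filtered zip sum (alternative decomposition; return value only, no mutation).

-- ===== PORT A =====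
-- A: one loop carrying (ile_znakow, poziom); a 1-char string znak equals start iff start.toList = [znak]
def policz_znaki (napis : String) (start : String) (end_ : String) : Int :=
  (napis.toList.foldl (fun (st : Int × Int) znak =>
      if start.toList = [znak] then (st.1, st.2 + 1)
      else if end_.toList = [znak] then (st.1, st.2 - 1)
      else (st.1 + st.2, st.2)) ((0 : Int), (0 : Int))).1

-- ===== PORT B =====
-- delta of one character: +1 start, -1 end, 0 otherwise (start takes priority)
def pzDelta (start : String) (end_ : String) (z : Char) : Int :=
  if start.toList = [z] then 1 else if end_.toList = [z] then -1 else 0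

-- exclusive running sum: levels[i] = sum of deltas before index i (Source B's append loop)
def pzLevels : List Int → Int → List Int
  | [], _ => []
  | d :: ds, acc => acc :: pzLevels ds (acc + d)

def policz_znaki_alt (napis : String) (start : String) (end_ : String) : Int :=
  let deltas := napis.toList.map (pzDelta start end_)
  let levels := pzLevels deltas 0
  ((napis.toList.zip levels).filter
      (fun p => !(decide (start.toList = [p.1])) && !(decide (end_.toList = [p.1])))).foldl
    (fun s p => s + p.2) 0

-- ===== PRECONDITION & SPEC =====
def Spec_policz_znaki (napis : String) (start : String) (end_ : String) (out : Int) : Prop := out = policz_znaki_alt napis start end_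
instance (napis : String) (start : String) (end_ : String) (out : Int) : Decidable (Spec_policz_znaki napis start end_ out) := by unfold Spec_policz_znaki; infer_instance

-- ===== CLAIM (what is proved, stated in full; the proofs are below) =====
def Claim_equal_policz_znaki : Prop := ∀ (napis : String) (start : String) (end_ : String), Dom_policz_znaki napis start end_ → Spec_policz_znaki napis start end_ (policz_znaki napis start end_)

-- ===== LEMMAS AND PROOFS =====

-- structural reference function: weighted count of non-bracket chars starting at level p
def pzSpec (start : String) (end_ : String) : List Char → Int → Int
  | [], _ => 0
  | z :: l, p =>
      (if start.toList = [z] then 0 else if end_.toList = [z] then 0 else p)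
        + pzSpec start end_ l (p + pzDelta start end_ z)

theorem pz_foldl_shift (xs : List (Char × Int)) (s : Int) :
    xs.foldl (fun a q => a + q.2) s = s + xs.foldl (fun a q => a + q.2) 0 := by
  induction xs generalizing s with
  | nil => simp
  | cons x xs ih =>
      simp only [List.foldl_cons]
      rw [ih (s + x.2), ih (0 + x.2)]
      ring

theorem pzB_eq (start end_ : String) (l : List Char) (p : Int) :
    ((l.zip (pzLevels (l.map (pzDelta start end_)) p)).filter
        (fun q => !(decide (start.toList = [q.1])) && !(decide (end_.toList = [q.1])))).foldl
      (fun s q => s + q.2) 0 = pzSpec start end_ l p := by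
  induction l generalizing p with
  | nil => simp [pzLevels, pzSpec]
  | cons z l ih =>
      simp only [List.map_cons, pzLevels, List.zip_cons_cons, List.filter_cons, pzSpec]
      by_cases hs : start.toList = [z]
      · have hb : (!(decide (start.toList = [z])) && !(decide (end_.toList = [z]))) = false := by
          simp [hs]
        have hd : pzDelta start end_ z = 1 := by rw [pzDelta, if_pos hs]
        rw [hb, if_pos hs, hd]
        simpa using ih (p + 1)
      · by_cases he : end_.toList = [z]
        · have hb : (!(decide (start.toList = [z])) && !(decide (end_.toList = [z]))) = false := by
            simp [he]
          have hd : pzDelta start end_ z = -1 := by rw [pzDelta, if_neg hs, if_pos he]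
          rw [hb, if_neg hs, if_pos he, hd]
          simpa using ih (p + -1)
        · have hb : (!(decide (start.toList = [z])) && !(decide (end_.toList = [z]))) = true := by
            simp [hs, he]
          have hd : pzDelta start end_ z = 0 := by rw [pzDelta, if_neg hs, if_neg he]
          rw [hb, if_neg hs, if_neg he, hd]
          simp only [if_true, List.foldl_cons]
          rw [pz_foldl_shift, ih]
          ring_nf

theorem pzA_eq (start end_ : String) (l : List Char) (i p : Int) :
    (l.foldl (fun (st : Int × Int) znak =>
        if start.toList = [znak] then (st.1, st.2 + 1)
        else if end_.toList = [znak] then (st.1, st.2 - 1)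
        else (st.1 + st.2, st.2)) (i, p)).1 = i + pzSpec start end_ l p := by
  induction l generalizing i p with
  | nil => simp [pzSpec]
  | cons z l ih =>
      simp only [List.foldl_cons, pzSpec]
      by_cases hs : start.toList = [z]
      · have hd : pzDelta start end_ z = 1 := by rw [pzDelta, if_pos hs]
        rw [if_pos hs, ih, if_pos hs, hd]
        simp
      · by_cases he : end_.toList = [z]
        · have hd : pzDelta start end_ z = -1 := by rw [pzDelta, if_neg hs, if_pos he]
          rw [if_neg hs, if_pos he, ih, if_neg hs, if_pos he, hd]
          rw [show p - 1 = p + -1 by ring]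
          simp
        · have hd : pzDelta start end_ z = 0 := by rw [pzDelta, if_neg hs, if_neg he]
          rw [if_neg hs, if_neg he, ih, if_neg hs, if_neg he, hd]
          ring

-- ===== VERDICT (by name: the statement is the Claim_ definition above) =====
theorem policz_znaki_spec : Claim_equal_policz_znaki := by
  intro napis start end_ _
  unfold Spec_policz_znaki policz_znaki policz_znaki_alt
  rw [pzA_eq, pzB_eq]
  ring
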